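-- pv_equiv track=rewrite | github.com/intake/intake | intake/interface/gui.py | get_catlist
-- ===== SOURCE A (Python) =====
-- def get_catlist(catnames, children, outlist=None, seen=None):
--     outlist = outlist or []
--     seen = seen or set()
--     for name in sorted(catnames):
--         if name in seen:
--             continue
--         seen.add(name)
--         outlist.append(name)
--         if name in children:
--             get_catlist(children[name], children, outlist, seen)
--     return outlist
-- ===== SOURCE B (Python) =====
-- def _expand(children, names, seg, vis):
--     # Returns a NEW list: seg + the preorder listing of `names` under `children`,
--     # skipping anything already visited.  INVARIANT (matched step for step by the
--     # Lean port, which writes the value out): at every step, vis == the initially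
--     # seen names | set of every name in any segment built so far.
--     seg = list(seg)
--     for c in names:
--         if c in vis:
--             continue
--         vis.add(c)
--         if c in children:
--             sub = _expand(children, sorted(children[c]), [c], vis)
--         else:
--             sub = [c]
--         seg += sub
--     return seg
--
--
-- def get_catlist(catnames, children, outlist=None, seen=None):
--     # Build the deduplicated preorder listing as a fresh list with a segment-building
--     # helper, then merge it into the caller's containers in one step.
--     outlist = outlist or []
--     seen = seen or set()
--     seg = _expand(children, sorted(catnames), [], set(seen))
--     outlist += seg
--     seen |= set(seg)
--     return outlist
-- ===== Notes on version B (the rewrite author's own statement) =====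
-- stated objective: alternative
-- what changed: A's recursion that accumulates into a shared outlist while mutating a shared seen set is replaced by a pure segment-building recursion (_expand) that returns fresh lists, takes the visited set as an explicit value recomputed as seen|set(seg), and is merged into outlist/seen once at the end.
import Mathlib
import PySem

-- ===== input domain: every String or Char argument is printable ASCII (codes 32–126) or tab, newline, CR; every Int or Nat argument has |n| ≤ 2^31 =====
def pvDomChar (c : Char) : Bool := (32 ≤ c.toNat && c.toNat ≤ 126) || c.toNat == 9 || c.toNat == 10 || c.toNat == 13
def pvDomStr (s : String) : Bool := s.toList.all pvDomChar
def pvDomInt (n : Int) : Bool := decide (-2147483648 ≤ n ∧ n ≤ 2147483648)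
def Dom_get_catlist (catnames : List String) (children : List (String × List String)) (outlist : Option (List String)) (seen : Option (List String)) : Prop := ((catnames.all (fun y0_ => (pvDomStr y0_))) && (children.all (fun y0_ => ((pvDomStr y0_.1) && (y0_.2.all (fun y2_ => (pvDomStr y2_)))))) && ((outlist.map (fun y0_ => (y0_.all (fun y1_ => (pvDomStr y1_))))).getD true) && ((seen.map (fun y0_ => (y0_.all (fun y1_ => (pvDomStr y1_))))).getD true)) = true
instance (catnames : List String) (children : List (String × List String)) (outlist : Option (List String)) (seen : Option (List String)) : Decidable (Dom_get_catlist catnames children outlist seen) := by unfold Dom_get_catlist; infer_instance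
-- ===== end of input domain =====

-- B replaces A's in-place accumulating recursion by a pure segment-building function (fresh lists,
-- visited set passed explicitly, merged into outlist/seen once at the end); equivalence is about the
-- RETURN value — both Pythons also mutate a caller-supplied outlist/seen in place (A incrementally,
-- B in one final merge).

-- measure for the two ports' recursions: number of children-entries whose key has not been seen yet
-- (cited by the ports' decreasing_by; proofs of the ports' termination only)
def pvUnseen (children : List (String × List String)) (seen : List String) : Nat :=
  (children.filter (fun p => !(decide (p.1 ∈ seen)))).length

lemma pvUnseen_mono (children : List (String × List String)) {s t : List String}
    (h : ∀ x, x ∈ s → x ∈ t) : pvUnseen children t ≤ pvUnseen children s := by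
  unfold pvUnseen
  rw [← List.countP_eq_length_filter, ← List.countP_eq_length_filter]
  apply List.countP_mono_left
  intro p _ hp
  simp only [Bool.not_eq_eq_eq_not, Bool.not_true, decide_eq_false_iff_not] at *
  exact fun hs => hp (h _ hs)

lemma pvUnseen_add_lt (children : List (String × List String)) (seen : PySem.Set String) (n : String)
    (hk : n ∈ children.map Prod.fst) (hn : n ∉ seen) :
    pvUnseen children (PySem.Set.add seen n) < pvUnseen children seen := by
  unfold pvUnseen
  induction children with
  | nil => simp at hk
  | cons p ps ih =>
    simp only [List.map_cons, List.mem_cons] at hk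
    by_cases hpn : p.1 = n
    · have h1 : (!decide (p.1 ∈ PySem.Set.add seen n)) = false := by
        simp [PySem.Set.mem_add, hpn]
      have h2 : (!decide (p.1 ∈ seen)) = true := by simp [hpn, hn]
      have hle := pvUnseen_mono ps (s := seen) (t := PySem.Set.add seen n)
        (fun x hx => by simp [PySem.Set.mem_add, hx])
      unfold pvUnseen at hle
      rw [List.filter_cons, List.filter_cons, h1, h2, if_neg Bool.false_ne_true, if_pos rfl]
      simp only [List.length_cons]
      omega
    · rcases hk with hk | hk
      · exact absurd hk.symm hpn
      · have heq : (!decide (p.1 ∈ PySem.Set.add seen n)) = (!decide (p.1 ∈ seen)) := by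
          simp [PySem.Set.mem_add, hpn]
        rw [List.filter_cons, List.filter_cons, heq]
        have hih := ih hk
        by_cases hb : (!decide (p.1 ∈ seen)) = true
        · rw [hb, if_pos rfl, if_pos rfl]; simp only [List.length_cons]; omega
        · rw [Bool.not_eq_true] at hb
          rw [hb, if_neg Bool.false_ne_true, if_neg Bool.false_ne_true]; exact hih

lemma pvUnseen_add_eq_of_not_key (children : List (String × List String)) (seen : PySem.Set String)
    (n : String) (hk : n ∉ children.map Prod.fst) :
    pvUnseen children (PySem.Set.add seen n) = pvUnseen children seen := by
  unfold pvUnseen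
  congr 1
  apply List.filter_congr
  intro p hp
  have hpn : p.1 ≠ n := fun h => hk (h ▸ List.mem_map_of_mem hp)
  simp [PySem.Set.mem_add, hpn]

lemma pvMemKeys {children : List (String × List String)} {n : String} {cs : List String}
    (h : (PySem.Dict.mk children).get? n = some cs) : n ∈ children.map Prod.fst := by
  have hm : n ∈ (PySem.Dict.mk children).keys := by
    by_contra hc
    rw [← PySem.Dict.get?_eq_none_iff_not_mem_keys] at hc
    simp [hc] at h
  simpa [PySem.Dict.keys] using hm

-- ===== PORT A =====
-- the body of A's `for name in sorted(...)` loop, over the already-sorted name list; the second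
-- component is Python's `seen`.  The tail call's `PySem.Set.union (PySem.Set.add seen n) r.2` has
-- exactly the members of Python's `seen` after the recursive call (r.2 only ever grows seen, which
-- the equivalence proof below establishes); the union is only there so termination is provable
-- without a forward reference.
def pvGoA (children : List (String × List String)) (names : List String)
    (out : List String) (seen : PySem.Set String) : List String × PySem.Set String :=
  match names with
  | [] => (out, seen)
  | n :: ns =>
    if hseen : PySem.Set.contains seen n then pvGoA children ns out seen   -- `if name in seen: continue`
    else
      match h : (PySem.Dict.mk children).get? n with                      -- `if name in children`
      | some cs =>
          -- nested call: `get_catlist(children[name], children, outlist, seen)` (which sorts cs)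
          let r := pvGoA children (PySem.List.sorted cs (fun x => x) false) (out ++ [n]) (PySem.Set.add seen n)
          pvGoA children ns r.1 (PySem.Set.union (PySem.Set.add seen n) r.2)
      | none => pvGoA children ns (out ++ [n]) (PySem.Set.add seen n)
termination_by (pvUnseen children seen, names.length)
decreasing_by
  · exact Prod.Lex.right _ (by simp)
  · apply Prod.Lex.left
    exact pvUnseen_add_lt children seen n (pvMemKeys h)
      (by simpa [PySem.Set.contains_iff] using hseen)
  · apply Prod.Lex.left
    refine lt_of_le_of_lt (pvUnseen_mono children ?_)
      (pvUnseen_add_lt children seen n (pvMemKeys h)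
        (by simpa [PySem.Set.contains_iff] using hseen))
    intro x hx
    simp [PySem.Set.mem_union, hx]
  · by_cases hk : n ∈ children.map Prod.fst
    · exact Prod.Lex.left _ _ (pvUnseen_add_lt children seen n hk
        (by simpa [PySem.Set.contains_iff] using hseen))
    · rw [pvUnseen_add_eq_of_not_key children seen n hk]
      exact Prod.Lex.right _ (by simp)

def get_catlist (catnames : List String) (children : List (String × List String))
    (outlist : Option (List String)) (seen : Option (List String)) : List String :=
  -- `outlist = outlist or []` (None and [] both yield []); `seen = seen or set()`
  (pvGoA children (PySem.List.sorted catnames (fun x => x) false)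
    (outlist.getD []) (PySem.Set.ofList (seen.getD []))).1

-- lex-step for pvExpand's sibling recursion: growing the segment can only shrink the measure
-- (cited by pvExpand's decreasing_by)
lemma pvUnseen_append_lex (children : List (String × List String)) (seen seg l : List String)
    {k k' : Nat} (hk : k' < k) :
    Prod.Lex (· < ·) (· < ·)
      (pvUnseen children (PySem.Set.union seen (PySem.Set.ofList (seg ++ l))), k')
      (pvUnseen children (PySem.Set.union seen (PySem.Set.ofList seg)), k) := by
  have hle : pvUnseen children (PySem.Set.union seen (PySem.Set.ofList (seg ++ l))) ≤
      pvUnseen children (PySem.Set.union seen (PySem.Set.ofList seg)) := by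
    apply pvUnseen_mono
    intro x hx
    simp only [PySem.Set.mem_union, PySem.Set.mem_ofList] at hx ⊢
    rcases hx with hx | hx
    · exact Or.inl hx
    · exact Or.inr (List.mem_append_left _ hx)
  rcases lt_or_eq_of_le hle with hlt | heq
  · exact Prod.Lex.left _ _ hlt
  · rw [heq]; exact Prod.Lex.right _ hk

-- ===== PORT B =====
-- Source B's `_expand(children, names, seg, vis)`: returns a NEW list, `seg` extended with the
-- preorder listing of `names`, skipping anything visited.  Source B grows one `vis` set under the
-- stated invariant `vis == initially-seen | names in segments built so far`; the port writes that
-- value, `PySem.Set.union seen (PySem.Set.ofList seg)` of the enclosing call, out at each step.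
def pvExpand (children : List (String × List String)) (names seg : List String)
    (seen : PySem.Set String) : List String :=
  match names with
  | [] => seg
  | c :: cs =>
    -- `vis = seen | set(seg); if c in vis: continue`
    if hv : PySem.Set.contains (PySem.Set.union seen (PySem.Set.ofList seg)) c then
      pvExpand children cs seg seen
    else
      match h : (PySem.Dict.mk children).get? c with
      | some g =>  -- `seg = seg + _expand(children, sorted(children[c]), [c], vis)`
          pvExpand children cs
            (seg ++ pvExpand children (PySem.List.sorted g (fun x => x) false) [c]
              (PySem.Set.union seen (PySem.Set.ofList seg))) seen
      | none => pvExpand children cs (seg ++ [c]) seen   -- `seg = seg + [c]`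
termination_by (pvUnseen children (PySem.Set.union seen (PySem.Set.ofList seg)), names.length)
decreasing_by
  · exact Prod.Lex.right _ (by simp)
  · apply Prod.Lex.left
    refine lt_of_le_of_lt (pvUnseen_mono children ?_)
      (pvUnseen_add_lt children (PySem.Set.union seen (PySem.Set.ofList seg)) c (pvMemKeys h)
        (by simpa [PySem.Set.contains_iff] using hv))
    intro x hx
    simp only [PySem.Set.mem_add, PySem.Set.mem_union, PySem.Set.mem_ofList] at hx
    simp only [PySem.Set.mem_union, PySem.Set.mem_ofList, List.mem_singleton]
    tauto
  · exact pvUnseen_append_lex children seen seg _ (by simp)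
  · exact pvUnseen_append_lex children seen seg _ (by simp)

def get_catlist_alt (catnames : List String) (children : List (String × List String))
    (outlist : Option (List String)) (seen : Option (List String)) : List String :=
  -- `seg = _expand(children, sorted(catnames), [], seen); outlist += seg; return outlist`
  outlist.getD [] ++ pvExpand children (PySem.List.sorted catnames (fun x => x) false) []
    (PySem.Set.ofList (seen.getD []))

-- ===== PRECONDITION & SPEC =====
def Spec_get_catlist (catnames : List String) (children : List (String × List String)) (outlist : Option (List String)) (seen : Option (List String)) (out : List String) : Prop := out = get_catlist_alt catnames children outlist seen
instance (catnames : List String) (children : List (String × List String)) (outlist : Option (List String)) (seen : Option (List String)) (out : List String) : Decidable (Spec_get_catlist catnames children outlist seen out) := by unfold Spec_get_catlist; infer_instance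

-- ===== CLAIM (what is proved, stated in full; the proofs are below) =====
def Claim_equal_get_catlist : Prop := ∀ (catnames : List String) (children : List (String × List String)) (outlist : Option (List String)) (seen : Option (List String)), Dom_get_catlist catnames children outlist seen → Spec_get_catlist catnames children outlist seen (get_catlist catnames children outlist seen)

-- ===== LEMMAS AND PROOFS =====

-- step lemmas unfolding one iteration of each worker
lemma pvGoA_nil (children : List (String × List String)) (out : List String) (seen : PySem.Set String) :
    pvGoA children [] out seen = (out, seen) := by
  rw [pvGoA]

lemma pvGoA_cons_seen (children : List (String × List String)) (n : String) (ns out : List String)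
    (seen : PySem.Set String) (hc : PySem.Set.contains seen n = true) :
    pvGoA children (n :: ns) out seen = pvGoA children ns out seen := by
  rw [pvGoA, dif_pos hc]

lemma pvGoA_cons_some (children : List (String × List String)) {n : String} {cs : List String}
    (ns out : List String) (seen : PySem.Set String)
    (hc : ¬ PySem.Set.contains seen n = true) (h : (PySem.Dict.mk children).get? n = some cs) :
    pvGoA children (n :: ns) out seen =
      pvGoA children ns
        (pvGoA children (PySem.List.sorted cs (fun x => x) false) (out ++ [n]) (PySem.Set.add seen n)).1
        (PySem.Set.union (PySem.Set.add seen n)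
          (pvGoA children (PySem.List.sorted cs (fun x => x) false) (out ++ [n]) (PySem.Set.add seen n)).2) := by
  rw [pvGoA, dif_neg hc]
  split
  · rename_i cs' h'
    rw [h'] at h
    injection h with hcs
    subst hcs
    rfl
  · rename_i h'
    rw [h'] at h
    cases h

lemma pvGoA_cons_none (children : List (String × List String)) {n : String} (ns out : List String)
    (seen : PySem.Set String)
    (hc : ¬ PySem.Set.contains seen n = true) (h : (PySem.Dict.mk children).get? n = none) :
    pvGoA children (n :: ns) out seen = pvGoA children ns (out ++ [n]) (PySem.Set.add seen n) := by
  rw [pvGoA, dif_neg hc]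
  split
  · rename_i cs' h'
    rw [h'] at h
    cases h
  · rfl

lemma pvExpand_nil (children : List (String × List String)) (seg : List String)
    (seen : PySem.Set String) : pvExpand children [] seg seen = seg := by
  rw [pvExpand]

lemma pvExpand_cons_seen (children : List (String × List String)) (c : String) (cs seg : List String)
    (seen : PySem.Set String)
    (hv : PySem.Set.contains (PySem.Set.union seen (PySem.Set.ofList seg)) c = true) :
    pvExpand children (c :: cs) seg seen = pvExpand children cs seg seen := by
  rw [pvExpand, dif_pos hv]

lemma pvExpand_cons_some (children : List (String × List String)) {c : String} {g : List String}
    (cs seg : List String) (seen : PySem.Set String)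
    (hv : ¬ PySem.Set.contains (PySem.Set.union seen (PySem.Set.ofList seg)) c = true)
    (h : (PySem.Dict.mk children).get? c = some g) :
    pvExpand children (c :: cs) seg seen =
      pvExpand children cs
        (seg ++ pvExpand children (PySem.List.sorted g (fun x => x) false) [c]
          (PySem.Set.union seen (PySem.Set.ofList seg))) seen := by
  rw [pvExpand, dif_neg hv]
  split
  · rename_i g' h'
    rw [h'] at h
    injection h with hg
    subst hg
    rfl
  · rename_i h'
    rw [h'] at h
    cases h

lemma pvExpand_cons_none (children : List (String × List String)) {c : String}
    (cs seg : List String) (seen : PySem.Set String)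
    (hv : ¬ PySem.Set.contains (PySem.Set.union seen (PySem.Set.ofList seg)) c = true)
    (h : (PySem.Dict.mk children).get? c = none) :
    pvExpand children (c :: cs) seg seen = pvExpand children cs (seg ++ [c]) seen := by
  rw [pvExpand, dif_neg hv]
  split
  · rename_i g' h'
    rw [h'] at h
    cases h
  · rfl

-- MAIN INVARIANT: A's recursion with seen-state sA produces exactly the fresh segment Δ that B's
-- pure pvExpand appends to seg, whenever sA's members are sB's members plus seg's elements; and A's
-- seen afterwards is sA plus Δ.
lemma pvMain (children : List (String × List String)) :
    ∀ (names out : List String) (sA : PySem.Set String), ∀ (seg : List String) (sB : PySem.Set String),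
      (∀ x, x ∈ sA ↔ (x ∈ sB ∨ x ∈ seg)) →
      ∃ Δ : List String,
        pvExpand children names seg sB = seg ++ Δ ∧
        (pvGoA children names out sA).1 = out ++ Δ ∧
        (∀ x, x ∈ (pvGoA children names out sA).2 ↔ (x ∈ sA ∨ x ∈ Δ)) := by
  intro names out sA
  induction names, out, sA using pvGoA.induct children with
  | case1 out sA =>
    intro seg sB h
    refine ⟨[], by simp [pvExpand_nil], by simp [pvGoA_nil], ?_⟩
    intro x; simp [pvGoA_nil]
  | case2 out sA n ns hc ih =>
    intro seg sB h
    have hnA : n ∈ sA := (PySem.Set.contains_iff sA n).1 hc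
    have hv : PySem.Set.contains (PySem.Set.union sB (PySem.Set.ofList seg)) n = true := by
      rw [PySem.Set.contains_iff]
      simp only [PySem.Set.mem_union, PySem.Set.mem_ofList]
      exact (h n).1 hnA
    rw [pvGoA_cons_seen children n ns out sA hc, pvExpand_cons_seen children n ns seg sB hv]
    exact ih seg sB h
  | case3 out sA n ns hc cs hget r ih1 ih2 =>
    intro seg sB h
    have hnA : n ∉ sA := fun hm => hc ((PySem.Set.contains_iff sA n).2 hm)
    have hv : ¬ PySem.Set.contains (PySem.Set.union sB (PySem.Set.ofList seg)) n = true := by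
      rw [PySem.Set.contains_iff]
      simp only [PySem.Set.mem_union, PySem.Set.mem_ofList]
      intro hm
      exact hnA ((h n).2 hm)
    have hr : r = pvGoA children (PySem.List.sorted cs (fun x => x) false) (out ++ [n])
        (PySem.Set.add sA n) := rfl
    rw [hr] at ih2
    -- inner call: B's child expansion with seg = [n], seen = vis
    obtain ⟨Δ1, hB1, hA1, hS1⟩ :=
      ih1 [n] (PySem.Set.union sB (PySem.Set.ofList seg)) (by
        intro x
        simp only [PySem.Set.mem_add, PySem.Set.mem_union, PySem.Set.mem_ofList,
          List.mem_singleton, h x])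
    -- tail call: sibling names with the grown segment
    obtain ⟨Δ2, hB2, hA2, hS2⟩ :=
      ih2 (seg ++ ([n] ++ Δ1)) sB (by
        intro x
        simp only [PySem.Set.mem_union, PySem.Set.mem_add, hS1 x, List.mem_append,
          List.mem_singleton, h x]
        tauto)
    refine ⟨[n] ++ Δ1 ++ Δ2, ?_, ?_, ?_⟩
    · rw [pvExpand_cons_some children ns seg sB hv hget, hB1, hB2]
      simp
    · rw [pvGoA_cons_some children ns out sA hc hget, hA2, hA1]
      simp
    · intro x
      rw [pvGoA_cons_some children ns out sA hc hget, hS2 x]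
      simp only [PySem.Set.mem_union, PySem.Set.mem_add, hS1 x, List.mem_append,
        List.mem_singleton]
      tauto
  | case4 out sA n ns hc hget ih =>
    intro seg sB h
    have hnA : n ∉ sA := fun hm => hc ((PySem.Set.contains_iff sA n).2 hm)
    have hv : ¬ PySem.Set.contains (PySem.Set.union sB (PySem.Set.ofList seg)) n = true := by
      rw [PySem.Set.contains_iff]
      simp only [PySem.Set.mem_union, PySem.Set.mem_ofList]
      intro hm
      exact hnA ((h n).2 hm)
    obtain ⟨Δ, hB, hA, hS⟩ :=
      ih (seg ++ [n]) sB (by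
        intro x
        simp only [PySem.Set.mem_add, List.mem_append, List.mem_singleton, h x]
        tauto)
    refine ⟨[n] ++ Δ, ?_, ?_, ?_⟩
    · rw [pvExpand_cons_none children ns seg sB hv hget, hB]
      simp
    · rw [pvGoA_cons_none children ns out sA hc hget, hA]
      simp
    · intro x
      rw [pvGoA_cons_none children ns out sA hc hget, hS x]
      simp only [PySem.Set.mem_add, List.mem_append, List.mem_singleton]
      tauto

-- ===== VERDICT (by name: the statement is the Claim_ definition above) =====
theorem get_catlist_spec : Claim_equal_get_catlist := by
  unfold Claim_equal_get_catlist
  intro catnames children outlist seen _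
  unfold Spec_get_catlist get_catlist get_catlist_alt
  obtain ⟨Δ, hB, hA, -⟩ :=
    pvMain children (PySem.List.sorted catnames (fun x => x) false) (outlist.getD [])
      (PySem.Set.ofList (seen.getD [])) [] (PySem.Set.ofList (seen.getD []))
      (by intro x; simp)
  rw [hA, hB]
  simp
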